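-- pv_equiv track=rewrite | github.com/RaviGupta161990/pyProg | 16_03/program1.py | max_zeros
-- ===== SOURCE A (Python) =====
-- def max_zeros(input_string):
--     count = 0
--     max_count = []
--     for i in range(len(input_string)):
--         if input_string[i] == '0':
--             count += 1
--         else:
--             max_count.append(count)
--             count = 0
--     max_count.append(count)
--     return max(max_count)
-- ===== SOURCE B (Python) =====
-- def max_zeros(input_string):
--     runs = "".join(c if c == '0' else ' ' for c in input_string).split()
--     return max(map(len, runs), default=0)
-- ===== Notes on version B (the rewrite author's own statement) =====
-- stated objective: idiomatic
-- what changed: B keeps no running counter and no list of completed counts: it blanks every non-zero character, lets str.split() cut the string into the maximal zero-runs, and takes the max of their lengths with default=0.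
import Mathlib
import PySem

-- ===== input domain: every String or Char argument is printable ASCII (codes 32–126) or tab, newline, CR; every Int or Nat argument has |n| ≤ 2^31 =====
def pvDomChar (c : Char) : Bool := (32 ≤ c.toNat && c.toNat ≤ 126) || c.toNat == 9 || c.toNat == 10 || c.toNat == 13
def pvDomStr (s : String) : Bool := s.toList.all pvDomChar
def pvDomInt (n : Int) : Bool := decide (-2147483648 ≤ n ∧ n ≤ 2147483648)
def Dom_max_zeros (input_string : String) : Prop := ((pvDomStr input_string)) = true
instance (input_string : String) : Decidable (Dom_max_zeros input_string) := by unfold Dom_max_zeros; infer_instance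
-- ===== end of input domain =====

-- B blanks non-'0' chars and takes max(len) over str.split() runs instead of A's counter+list loop (idiomatic; same return value).


-- ===== PORT A =====
-- the for-loop over range(len(input_string)) with in-range indexing visits the characters in order: folded over toList
def max_zeros (input_string : String) : Int :=
  let st := input_string.toList.foldl
    (fun (st : Int × List Int) c =>
      if c = '0' then (st.1 + 1, st.2) else (0, st.2 ++ [st.1]))
    ((0 : Int), ([] : List Int))
  let max_count := st.2 ++ [st.1]
  -- max(max_count): max_count is never empty (count is appended after the loop), so Python's max returns its maximum
  (PySem.List.max? max_count (fun y => y)).getD 0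

-- ===== PORT B =====
def max_zeros_alt (input_string : String) : Int :=
  let blanked := input_string.toList.map (fun c => if c = '0' then c else ' ')
  let runs := PySem.Chars.split₀ blanked
  PySem.List.maxD (runs.map (fun r => (r.length : Int))) (fun y => y) 0

-- ===== PRECONDITION & SPEC =====
def Spec_max_zeros (input_string : String) (out : Int) : Prop := out = max_zeros_alt input_string
instance (input_string : String) (out : Int) : Decidable (Spec_max_zeros input_string out) := by unfold Spec_max_zeros; infer_instance

-- ===== CLAIM (what is proved, stated in full; the proofs are below) =====
def Claim_equal_max_zeros : Prop := ∀ (input_string : String), Dom_max_zeros input_string → Spec_max_zeros input_string (max_zeros input_string)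

-- ===== LEMMAS AND PROOFS =====

/-- reference: max run of zeros in `l`, with `cur` zeros carried in and `b` the best so far. -/
def pvBest : List Char → Int → Int → Int
  | [], cur, b => max b cur
  | x :: r, cur, b => if x = '0' then pvBest r (cur + 1) b else pvBest r 0 (max b cur)

/-- A's run-length list produced from state `(c, acc)` (the loop keeps `acc`, appends `c` at the end). -/
def pvRuns : List Char → Int → List Int
  | [], c => [c]
  | x :: r, c => if x = '0' then pvRuns r (c + 1) else c :: pvRuns r 0

theorem pvRuns_foldA (l : List Char) (c : Int) (acc : List Int) :
    (l.foldl (fun (st : Int × List Int) ch =>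
        if ch = '0' then (st.1 + 1, st.2) else (0, st.2 ++ [st.1])) (c, acc)).2
      ++ [(l.foldl (fun (st : Int × List Int) ch =>
        if ch = '0' then (st.1 + 1, st.2) else (0, st.2 ++ [st.1])) (c, acc)).1]
      = acc ++ pvRuns l c := by
  induction l generalizing c acc with
  | nil => simp [pvRuns]
  | cons x r ih =>
    by_cases hx : x = '0' <;> simp [pvRuns, hx, ih]

theorem pvBest_foldMax (l : List Char) (c b : Int) :
    (pvRuns l c).foldl max b = pvBest l c b := by
  induction l generalizing c b with
  | nil => simp [pvRuns, pvBest]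
  | cons x r ih =>
    by_cases hx : x = '0' <;> simp [pvRuns, pvBest, hx, ih]

theorem pvMax_getD (xs : List Int) (h : xs ≠ []) (hn : ∀ x ∈ xs, 0 ≤ x) :
    (PySem.List.max? xs (fun y => y)).getD 0 = xs.foldl max 0 := by
  cases xs with
  | nil => exact absurd rfl h
  | cons x t =>
    rw [PySem.List.max?_id_cons]
    have hx : max 0 x = x := max_eq_right (hn x (by simp))
    simp [hx]

theorem pvRuns_nonneg (l : List Char) (c : Int) (hc : 0 ≤ c) :
    ∀ x ∈ pvRuns l c, 0 ≤ x := by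
  induction l generalizing c with
  | nil => simpa [pvRuns] using hc
  | cons x r ih =>
    by_cases hx : x = '0'
    · simpa [pvRuns, hx] using ih (c + 1) (by omega)
    · intro y hy
      simp only [pvRuns, hx, if_false, List.mem_cons] at hy
      rcases hy with rfl | hy
      · exact hc
      · exact ih 0 le_rfl y hy

theorem pvRuns_ne_nil (l : List Char) (c : Int) : pvRuns l c ≠ [] := by
  cases l with
  | nil => simp [pvRuns]
  | cons x r =>
    by_cases hx : x = '0' <;> simp [pvRuns, hx]
    exact pvRuns_ne_nil r (c + 1)

/-- key lemma about B's grouping: folding `max` over the (Int) lengths of the groups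
`split₀.go` produces from the blanked list equals `pvBest`, where `cur` is the current
(zeros-only, reversed) group and `B` is `b` folded with the lengths of the completed groups. -/
theorem pvGo_spec (l : List Char) (cur : List Char) (acc : List (List Char)) (b B : Int)
    (hB0 : 0 ≤ B)
    (hB : (acc.reverse.map (fun r => (r.length : Int))).foldl max b = B) :
    ((PySem.Chars.split₀.go (l.map (fun c => if c = '0' then c else ' ')) cur acc).map
        (fun r => (r.length : Int))).foldl max b
      = pvBest l (cur.length : Int) B := by
  induction l generalizing cur acc b B with
  | nil =>
    by_cases hcur : cur = []
    · subst hcur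
      simp only [List.map_nil, PySem.Chars.split₀.go, List.isEmpty_nil, if_true, hB]
      simp [pvBest, max_eq_left hB0]
    · simp only [List.map_nil, PySem.Chars.split₀.go, List.isEmpty_iff, hcur, if_false]
      simp only [List.reverse_cons, List.map_append, List.foldl_append, List.map_cons,
        List.map_nil, List.foldl_cons, List.foldl_nil, hB, List.length_reverse]
      simp [pvBest]
  | cons x r ih =>
    by_cases hx : x = '0'
    · subst hx
      have hstep : PySem.Chars.split₀.go (('0' :: r).map (fun c => if c = '0' then c else ' '))
          cur acc = PySem.Chars.split₀.go (r.map (fun c => if c = '0' then c else ' '))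
          ('0' :: cur) acc := by
        simp [PySem.Chars.split₀.go, PySem.Chars.isspace]
      rw [hstep, ih ('0' :: cur) acc b B hB0 hB]
      simp [pvBest]
    · have hstep : (fun c => if c = '0' then c else ' ') x = ' ' := by simp [hx]
      by_cases hcur : cur = []
      · subst hcur
        have hgo : PySem.Chars.split₀.go ((x :: r).map (fun c => if c = '0' then c else ' '))
            [] acc = PySem.Chars.split₀.go (r.map (fun c => if c = '0' then c else ' '))
            [] acc := by
          simp [PySem.Chars.split₀.go, hstep, PySem.Chars.isspace]
        rw [hgo, ih [] acc b B hB0 hB]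
        simp [pvBest, hx, max_eq_left hB0]
      · have hgo : PySem.Chars.split₀.go ((x :: r).map (fun c => if c = '0' then c else ' '))
            cur acc = PySem.Chars.split₀.go (r.map (fun c => if c = '0' then c else ' '))
            [] (cur.reverse :: acc) := by
          simp [PySem.Chars.split₀.go, hstep, PySem.Chars.isspace, hcur]
        rw [hgo, ih [] (cur.reverse :: acc) b (max B (cur.length : Int)) (le_trans hB0 (le_max_left _ _)) ?_]
        · simp [pvBest, hx]
        · simp only [List.reverse_cons, List.map_append, List.foldl_append, List.map_cons,
            List.map_nil, List.foldl_cons, List.foldl_nil, hB, List.length_reverse]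

theorem pvMaxD_nonneg (xs : List (List Char)) :
    PySem.List.maxD (xs.map (fun r => (r.length : Int))) (fun y => y) 0
      = (xs.map (fun r => (r.length : Int))).foldl max 0 := by
  cases xs with
  | nil => simp [PySem.List.maxD, PySem.List.max?]
  | cons x t =>
    simp only [List.map_cons, PySem.List.maxD, PySem.List.max?_id_cons, Option.getD_some]
    have h : max (0:Int) (x.length : Int) = (x.length : Int) := max_eq_right (by positivity)
    rw [List.foldl_cons, h]

-- ===== VERDICT (by name: the statement is the Claim_ definition above) =====
theorem max_zeros_spec : Claim_equal_max_zeros := by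
  intro s _
  unfold Spec_max_zeros max_zeros max_zeros_alt
  simp only [PySem.Chars.split₀]
  rw [pvMaxD_nonneg, pvGo_spec s.toList [] [] 0 0 le_rfl (by simp)]
  rw [pvMax_getD _ ?_ ?_]
  · rw [pvRuns_foldA s.toList 0 [], List.nil_append, pvBest_foldMax]
    rfl
  · rw [pvRuns_foldA s.toList 0 [], List.nil_append]
    exact pvRuns_ne_nil _ _
  · rw [pvRuns_foldA s.toList 0 [], List.nil_append]
    exact pvRuns_nonneg _ _ le_rfl
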